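-- pv_equiv track=rewrite | github.com/ZhuYacheng/python.keyword_find | keword_find.py | switch_case_num
-- ===== SOURCE A (Python) =====
-- def switch_case_num(all_words):
--     """统计switch-case个数"""
--     case_num = []
--     switch_num = 0
--
--     while True:
--         num = 0
--         if 'default' in all_words:
--             default_subscript = all_words.index('default')
--             switch_num += 1
--             for word in all_words[:default_subscript]:
--                 if word == 'case':
--                     num += 1
--             case_num.append(num)
--             del all_words[:default_subscript + 1]
--         else:
--             break
--     return case_num, switch_num
-- ===== SOURCE B (Python) =====
-- def switch_case_num(all_words):
--     """统计switch-case个数 — single pass; note: unlike A, B does not mutate all_words."""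
--     case_num = []
--     num = 0
--     for word in all_words:
--         if word == 'case':
--             num += 1
--         elif word == 'default':
--             case_num.append(num)
--             num = 0
--     return case_num, len(case_num)
-- ===== Notes on version B (the rewrite author's own statement) =====
-- stated objective: simpler
-- what changed: Replaced the repeated index/count/delete loop (rescanning and truncating the list for each 'default') by a single non-mutating left-to-right pass that counts 'case' and flushes/resets the counter at each 'default', returning len(case_num) as the switch count.
import Mathlib
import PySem

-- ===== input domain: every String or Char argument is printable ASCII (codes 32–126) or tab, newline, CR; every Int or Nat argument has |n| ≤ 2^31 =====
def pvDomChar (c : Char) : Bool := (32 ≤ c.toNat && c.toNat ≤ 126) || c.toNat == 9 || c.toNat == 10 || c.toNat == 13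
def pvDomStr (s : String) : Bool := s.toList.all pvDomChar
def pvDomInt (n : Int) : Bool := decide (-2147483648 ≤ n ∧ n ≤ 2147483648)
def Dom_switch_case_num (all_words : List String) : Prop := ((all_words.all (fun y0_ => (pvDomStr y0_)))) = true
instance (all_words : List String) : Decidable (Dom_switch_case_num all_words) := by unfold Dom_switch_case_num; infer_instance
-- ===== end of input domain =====

-- B replaces A's repeated index/count/delete rescans by one left-to-right counting pass;
-- equivalence is about the RETURN value only: A mutates its argument list in place (del), B does not.

-- ===== PORT A =====
-- termination fact for the while-loop recursion, cited by name in decreasing_by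
theorem pvLoopA_dec {l : List String} {i : Nat} (h : PySem.List.index? l "default" = some i) :
    (l.drop (i + 1)).length < l.length := by
  obtain ⟨hk, _, _⟩ := PySem.List.getElem_of_index?_eq_some h
  simp only [List.length_drop]; omega

-- while True: … ('in'/'index' via index?; all_words[:d] = take d since d ≥ 0; del [:d+1] = drop (d+1))
def pvLoopA (l : List String) (case_num : List Int) (switch_num : Int) : List Int × Int :=
  match h : PySem.List.index? l "default" with
  | some default_subscript =>
    -- for word in all_words[:default_subscript]: if word == 'case': num += 1
    let num : Int := (l.take default_subscript).foldl
      (fun n word => if word = "case" then n + 1 else n) 0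
    pvLoopA (l.drop (default_subscript + 1)) (case_num ++ [num]) (switch_num + 1)
  | none => (case_num, switch_num)
termination_by l.length
decreasing_by exact pvLoopA_dec h

def switch_case_num (all_words : List String) : List Int × Int :=
  pvLoopA all_words [] 0

-- ===== PORT B =====
def pvStepB (s : List Int × Int) (word : String) : List Int × Int :=
  if word = "case" then (s.1, s.2 + 1)
  else if word = "default" then (s.1 ++ [s.2], 0)
  else s

def switch_case_num_alt (all_words : List String) : List Int × Int :=
  let s := all_words.foldl pvStepB ([], 0)
  (s.1, (s.1.length : Int))

-- ===== PRECONDITION & SPEC =====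
def Spec_switch_case_num (all_words : List String) (out : List Int × Int) : Prop := out = switch_case_num_alt all_words
instance (all_words : List String) (out : List Int × Int) : Decidable (Spec_switch_case_num all_words out) := by unfold Spec_switch_case_num; infer_instance

-- ===== CLAIM (what is proved, stated in full; the proofs are below) =====
def Claim_equal_switch_case_num : Prop := ∀ (all_words : List String), Dom_switch_case_num all_words → Spec_switch_case_num all_words (switch_case_num all_words)

-- ===== LEMMAS AND PROOFS =====

-- a segment without 'default' only accumulates the running case count
theorem segB (seg : List String) (hnd : "default" ∉ seg) :
    ∀ (acc : List Int) (k : Int),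
      seg.foldl pvStepB (acc, k)
        = (acc, seg.foldl (fun n word => if word = "case" then n + 1 else n) k) := by
  induction seg with
  | nil => intro acc k; rfl
  | cons w ws ih =>
    intro acc k
    have hw : w ≠ "default" := fun h => hnd (h ▸ List.mem_cons_self)
    have hws : "default" ∉ ws := fun h => hnd (List.mem_cons_of_mem _ h)
    by_cases hc : w = "case" <;>
      simp [pvStepB, hc, hw, ih hws]

-- B's accumulator grows by one per 'default'
theorem lenB (l : List String) : ∀ (acc : List Int) (k : Int),
    (l.foldl pvStepB (acc, k)).1.length = acc.length + l.count "default" := by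
  induction l with
  | nil => intro acc k; simp
  | cons w ws ih =>
    intro acc k
    by_cases hc : w = "case"
    · simp [pvStepB, hc, ih]
    · by_cases hd : w = "default" <;>
        simp [pvStepB, hc, hd, ih]; omega

-- main invariant: A's loop equals B's fold plus a default count
theorem loopA_eq : ∀ (n : Nat) (l : List String) (acc : List Int) (sw : Int),
    l.length ≤ n →
    pvLoopA l acc sw = ((l.foldl pvStepB (acc, 0)).1, sw + (l.count "default" : Int)) := by
  intro n
  induction n with
  | zero =>
    intro l acc sw hl
    have : l = [] := List.eq_nil_of_length_eq_zero (Nat.le_zero.mp hl)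
    subst this
    simp [pvLoopA]
  | succ n ih =>
    intro l acc sw hl
    match h : PySem.List.index? l "default" with
    | some i =>
      obtain ⟨pre, suf, hdecomp, hlen, hpre⟩ := (PySem.List.index?_eq_some_iff _ _ _).mp h
      subst hdecomp
      have htake : ((pre ++ "default" :: suf).take i) = pre := by
        rw [← hlen]; exact List.take_left' rfl
      have hdrop : ((pre ++ "default" :: suf).drop (i + 1)) = suf := by
        rw [← hlen]
        simp [List.drop_append]
      have hsuflen : suf.length ≤ n := by
        have := hl
        simp [List.length_append] at this
        omega
      rw [pvLoopA, h]
      simp only [htake, hdrop]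
      rw [ih suf _ _ hsuflen]
      -- right-hand side: decompose the fold over pre ++ "default" :: suf
      have hfold : (pre ++ "default" :: suf).foldl pvStepB (acc, (0:Int))
          = suf.foldl pvStepB
              (acc ++ [pre.foldl (fun n word => if word = "case" then n + 1 else n) (0:Int)], 0) := by
        rw [List.foldl_append, segB pre hpre, List.foldl_cons]
        simp [pvStepB]
      rw [hfold]
      have hcount : ((pre ++ "default" :: suf).count "default" : Int)
          = (suf.count "default" : Int) + 1 := by
        have : pre.count "default" = 0 := List.count_eq_zero.mpr hpre
        simp [List.count_append, this]
      rw [hcount]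
      simp only [Prod.mk.injEq, true_and]
      ring
    | none =>
      have hnd : "default" ∉ l := (PySem.List.index?_eq_none_iff _ _).mp h
      rw [pvLoopA, h]
      rw [segB l hnd]
      have : l.count "default" = 0 := List.count_eq_zero.mpr hnd
      simp [this]

-- ===== VERDICT (by name: the statement is the Claim_ definition above) =====
theorem switch_case_num_spec : Claim_equal_switch_case_num := by
  intro l _
  unfold Spec_switch_case_num switch_case_num switch_case_num_alt
  rw [loopA_eq l.length l [] 0 le_rfl]
  have := lenB l [] 0
  simp only [List.length_nil, Nat.zero_add] at this
  simp [this]
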